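-- pv_equiv track=rewrite | github.com/meena-294/AI-Powered_Insurance_claim_decision_system | tests/test_env.py | extract_correct_code
-- ===== SOURCE A (Python) =====
-- def extract_correct_code(policy_text):
--     if not policy_text:
--         return None
--
--     words = policy_text.split()
--     for word in words:
--         if any(char.isdigit() for char in word):
--             return word
--     return None
-- ===== SOURCE B (Python) =====
-- def extract_correct_code(policy_text):
--     if not policy_text:
--         return None
--     cur = []
--     has_digit = False
--     for ch in policy_text:
--         if ch.isspace():
--             if has_digit:
--                 return ''.join(cur)
--             cur = []
--             has_digit = False
--         else:
--             cur.append(ch)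
--             if ch.isdigit():
--                 has_digit = True
--     return ''.join(cur) if has_digit else None
-- ===== Notes on version B (the rewrite author's own statement) =====
-- stated objective: alternative
-- what changed: Replaced split()-then-scan-words with a single character-level pass that tracks the current word and a has-digit flag, returning at the first word boundary where the flag is set; no word list is built.
import Mathlib
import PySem

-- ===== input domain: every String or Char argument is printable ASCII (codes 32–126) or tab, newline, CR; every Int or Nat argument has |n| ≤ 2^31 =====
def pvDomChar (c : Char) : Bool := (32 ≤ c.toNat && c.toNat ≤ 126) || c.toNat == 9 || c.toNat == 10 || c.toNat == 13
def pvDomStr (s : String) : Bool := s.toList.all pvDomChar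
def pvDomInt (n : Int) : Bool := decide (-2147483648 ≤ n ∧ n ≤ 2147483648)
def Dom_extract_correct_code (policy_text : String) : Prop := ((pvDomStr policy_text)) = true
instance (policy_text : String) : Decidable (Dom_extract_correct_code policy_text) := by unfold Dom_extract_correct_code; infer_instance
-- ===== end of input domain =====

-- B replaces A's split()-then-scan-words with a single character-level pass tracking the current word and a has-digit flag (alternative decomposition, same O(n) cost).


-- ===== PORT A =====
-- the 'for word in words: if any(...): return word' loop
def pvFindWord : List String → Option String
  | [] => none
  | w :: ws => if w.toList.any PySem.Chars.isdigit then some w else pvFindWord ws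

def extract_correct_code (policy_text : String) : Option String :=
  if PySem.Str.len policy_text = 0 then none
  else pvFindWord (PySem.Str.split₀ policy_text)

-- ===== PORT B =====
-- single pass over the characters; cur = current word so far, hd = has_digit flag
def pvScan : List Char → List Char → Bool → Option (List Char)
  | [], cur, hd => if hd then some cur else none
  | c :: rest, cur, hd =>
    if PySem.Chars.isspace c then
      if hd then some cur else pvScan rest [] false
    else pvScan rest (cur ++ [c]) (hd || PySem.Chars.isdigit c)

def extract_correct_code_alt (policy_text : String) : Option String :=
  if PySem.Str.len policy_text = 0 then none
  else (pvScan policy_text.toList [] false).map String.ofList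

-- ===== PRECONDITION & SPEC =====
def Spec_extract_correct_code (policy_text : String) (out : Option String) : Prop := out = extract_correct_code_alt policy_text
instance (policy_text : String) (out : Option String) : Decidable (Spec_extract_correct_code policy_text out) := by unfold Spec_extract_correct_code; infer_instance

-- ===== CLAIM (what is proved, stated in full; the proofs are below) =====
def Claim_equal_extract_correct_code : Prop := ∀ (policy_text : String), Dom_extract_correct_code policy_text → Spec_extract_correct_code policy_text (extract_correct_code policy_text)

-- ===== LEMMAS AND PROOFS =====

-- first word (as List Char) containing a digit
def pvFindC : List (List Char) → Option (List Char)
  | [] => none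
  | w :: ws => if w.any PySem.Chars.isdigit then some w else pvFindC ws

theorem pvFindWord_map (ws : List (List Char)) :
    pvFindWord (ws.map String.ofList) = (pvFindC ws).map String.ofList := by
  induction ws with
  | nil => rfl
  | cons w ws ih =>
    simp only [List.map_cons, pvFindWord, pvFindC]
    rw [show (String.ofList w).toList = w from by simp]
    split_ifs with h <;> simp [ih]

theorem split₀_go_acc (cs : List Char) : ∀ (cur : List Char) (acc : List (List Char)),
    PySem.Chars.split₀.go cs cur acc = acc.reverse ++ PySem.Chars.split₀.go cs cur [] := by
  induction cs with
  | nil =>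
    intro cur acc
    simp only [PySem.Chars.split₀.go]
    split_ifs <;> simp
  | cons c rest ih =>
    intro cur acc
    simp only [PySem.Chars.split₀.go]
    split_ifs with h1 h2
    · exact ih [] acc
    · rw [ih [] (cur.reverse :: acc), ih [] [cur.reverse]]
      simp
    · exact ih (c :: cur) acc

theorem scan_eq_findC (cs : List Char) : ∀ (cur : List Char),
    pvScan cs cur.reverse (cur.any PySem.Chars.isdigit)
      = pvFindC (PySem.Chars.split₀.go cs cur []) := by
  induction cs with
  | nil =>
    intro cur
    simp only [pvScan, PySem.Chars.split₀.go]
    split_ifs with h1 h2 h2 <;>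
      simp_all [pvFindC, List.isEmpty_iff, List.any_eq_true]
  | cons c rest ih =>
    intro cur
    simp only [pvScan, PySem.Chars.split₀.go]
    split_ifs with h1 h2 h3 h3
    · -- space, has_digit: cur nonempty (a digit is in it), so word closed and returned
      exfalso
      rcases List.any_eq_true.mp h2 with ⟨x, hx, _⟩
      simp [List.isEmpty_iff] at h3; subst h3; simp at hx
    · -- space, has_digit, cur nonempty
      rw [split₀_go_acc rest [] [cur.reverse]]
      simp [pvFindC, h2]
    · -- space, no digit, cur empty
      simpa using ih []
    · -- space, no digit, cur nonempty
      rw [split₀_go_acc rest [] [cur.reverse]]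
      simp only [List.reverse_cons, List.reverse_nil, List.nil_append,
        List.singleton_append, pvFindC, List.any_reverse]
      rw [if_neg h2]
      exact ih []
    · -- non-space: extend cur
      have : cur.reverse ++ [c] = (c :: cur).reverse := by simp
      rw [this]
      have : (cur.any PySem.Chars.isdigit || PySem.Chars.isdigit c)
          = (c :: cur).any PySem.Chars.isdigit := by
        simp [List.any_cons, Bool.or_comm]
      rw [this]
      exact ih (c :: cur)

-- ===== VERDICT (by name: the statement is the Claim_ definition above) =====
theorem extract_correct_code_spec : Claim_equal_extract_correct_code := by
  intro s _
  unfold Spec_extract_correct_code extract_correct_code extract_correct_code_alt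
  split_ifs with h
  · rfl
  · rw [PySem.Str.split₀, show List.map String.ofList = List.map String.ofList from rfl,
        pvFindWord_map, PySem.Chars.split₀]
    rw [← scan_eq_findC s.toList []]
    rfl
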